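-- pv_equiv track=rewrite | github.com/Sedo-KFM/Satelite_py | Modelling.py | _get_crop_parameters
-- ===== SOURCE A (Python) =====
-- def _get_crop_parameters(matrix):
-- 	clear = False
-- 	width = 0
-- 	height = 0
-- 	x_first = 0
-- 	y_first = 0
-- 	matrix_len = len(matrix)
-- 	for row in range(matrix_len - 1, -1, -1):
-- 		clear = True
-- 		for col in range(matrix_len - 1, -1, -1):
-- 			if matrix[col][row] > 0:
-- 				clear = False
-- 				y_first = row
-- 		if not clear:
-- 			height += 1
-- 	for col in range(matrix_len - 1, -1, -1):
-- 		clear = True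
-- 		for row in range(matrix_len - 1, -1, -1):
-- 			if matrix[col][row] > 0:
-- 				clear = False
-- 				x_first = col
-- 		if not clear:
-- 			width += 1
-- 	return {'width': width, 'height': height, 'x_first': x_first, 'y_first': y_first}
-- ===== SOURCE B (Python) =====
-- def _get_crop_parameters(matrix):
--     n = len(matrix)
--     occupied_rows = set()
--     occupied_cols = set()
--     for col in range(n):
--         for row in range(n):
--             if matrix[col][row] > 0:
--                 occupied_rows.add(row)
--                 occupied_cols.add(col)
--     return {'width': len(occupied_cols),
--             'height': len(occupied_rows),
--             'x_first': min(occupied_cols) if occupied_cols else 0,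
--             'y_first': min(occupied_rows) if occupied_rows else 0}
-- ===== Notes on version B (the rewrite author's own statement) =====
-- stated objective: simpler
-- what changed: A makes two separate quadratic passes (rows then columns), each re-scanning the whole matrix with a clear-flag and last-write-wins minimum; B does one nested pass collecting occupied row and column index sets and reads width/height as the set sizes and x_first/y_first as the set minima (0 when empty).
import Mathlib
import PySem

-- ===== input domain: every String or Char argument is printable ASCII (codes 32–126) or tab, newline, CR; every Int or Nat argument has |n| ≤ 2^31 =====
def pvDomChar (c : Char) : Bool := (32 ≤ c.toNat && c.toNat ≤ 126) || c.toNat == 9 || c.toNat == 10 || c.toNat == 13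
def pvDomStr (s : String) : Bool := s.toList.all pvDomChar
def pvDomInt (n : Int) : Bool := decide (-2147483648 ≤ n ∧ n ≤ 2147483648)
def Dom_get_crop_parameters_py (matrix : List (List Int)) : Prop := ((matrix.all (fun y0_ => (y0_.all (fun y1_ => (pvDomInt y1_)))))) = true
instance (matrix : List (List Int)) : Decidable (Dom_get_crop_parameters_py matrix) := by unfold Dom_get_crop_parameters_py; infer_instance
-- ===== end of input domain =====

-- B replaces A's two separate quadratic bounding-box scans by one nested pass that collects
-- occupied row/column index sets and reads the counts and minima off those sets (objective: simpler).

-- matrix[col][row] (both ports index the same way; total form pyGetD is exact under Pre_)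
def pvGet (matrix : List (List Int)) (col row : Int) : Int :=
  PySem.List.pyGetD (PySem.List.pyGetD matrix col []) row 0

-- ===== PORT A =====
def get_crop_parameters_py (matrix : List (List Int)) : List (String × Int) :=
  let matrix_len : Int := (matrix.length : Int)
  let hy : Int × Int :=
    (PySem.List.pyRange (matrix_len - 1) (-1) (-1)).foldl
      (fun (s : Int × Int) row =>
        let inner : Bool × Int :=
          (PySem.List.pyRange (matrix_len - 1) (-1) (-1)).foldl
            (fun (t : Bool × Int) col =>
              if 0 < pvGet matrix col row then (false, row) else t)
            (true, s.2)
        if inner.1 = false then (s.1 + 1, inner.2) else (s.1, inner.2))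
      ((0 : Int), (0 : Int))
  let wx : Int × Int :=
    (PySem.List.pyRange (matrix_len - 1) (-1) (-1)).foldl
      (fun (s : Int × Int) col =>
        let inner : Bool × Int :=
          (PySem.List.pyRange (matrix_len - 1) (-1) (-1)).foldl
            (fun (t : Bool × Int) row =>
              if 0 < pvGet matrix col row then (false, col) else t)
            (true, s.2)
        if inner.1 = false then (s.1 + 1, inner.2) else (s.1, inner.2))
      ((0 : Int), (0 : Int))
  [("width", wx.1), ("height", hy.1), ("x_first", wx.2), ("y_first", hy.2)]

-- ===== PORT B =====
def get_crop_parameters_py_alt (matrix : List (List Int)) : List (String × Int) :=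
  let n : Int := (matrix.length : Int)
  let occ : PySem.Set Int × PySem.Set Int :=
    (PySem.List.pyRange 0 n 1).foldl
      (fun (s : PySem.Set Int × PySem.Set Int) col =>
        (PySem.List.pyRange 0 n 1).foldl
          (fun (t : PySem.Set Int × PySem.Set Int) row =>
            if 0 < pvGet matrix col row then (PySem.Set.add t.1 row, PySem.Set.add t.2 col) else t)
          s)
      (PySem.Set.empty, PySem.Set.empty)
  [("width", PySem.Set.len occ.2),
   ("height", PySem.Set.len occ.1),
   ("x_first", (PySem.List.min? occ.2 (fun x => x)).getD 0),
   ("y_first", (PySem.List.min? occ.1 (fun x => x)).getD 0)]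

-- ===== PRECONDITION & SPEC =====
-- Pre_ excludes exactly the inputs where A raises IndexError: some inner list shorter than len(matrix).
def Pre_get_crop_parameters_py (matrix : List (List Int)) : Prop :=
  ∀ r ∈ matrix, matrix.length ≤ r.length
instance (matrix : List (List Int)) : Decidable (Pre_get_crop_parameters_py matrix) := by unfold Pre_get_crop_parameters_py; infer_instance
def pvWitness_get_crop_parameters_py : List (List Int) := [[0, 1], [0, 0]]

def Spec_get_crop_parameters_py (matrix : List (List Int)) (out : List (String × Int)) : Prop := out = get_crop_parameters_py_alt matrix
instance (matrix : List (List Int)) (out : List (String × Int)) : Decidable (Spec_get_crop_parameters_py matrix out) := by unfold Spec_get_crop_parameters_py; infer_instance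

-- ===== CLAIM (what is proved, stated in full; the proofs are below) =====
def Claim_equal_get_crop_parameters_py : Prop := ∀ (matrix : List (List Int)), Dom_get_crop_parameters_py matrix → Pre_get_crop_parameters_py matrix → Spec_get_crop_parameters_py matrix (get_crop_parameters_py matrix)

-- ===== LEMMAS AND PROOFS =====

-- A's inner scan: clear goes false iff some index satisfies q; the write target is the constant v.
theorem pv_innerA (q : Int → Prop) [DecidablePred q] (v : Int) :
    ∀ (L : List Int) (b : Bool) (y : Int),
      L.foldl (fun (t : Bool × Int) i => if q i then (false, v) else t) (b, y)
        = (b && !(L.any fun i => decide (q i)), if (L.any fun i => decide (q i)) then v else y) := by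
  intro L
  induction L with
  | nil => intro b y; simp
  | cons a L ih =>
    intro b y
    by_cases h : q a <;> simp [h, ih]

-- A's outer scan counts the satisfied outer indices and keeps the last one written.
theorem pv_foldA (q : Int → Int → Prop) [inst : ∀ i o : Int, Decidable (q i o)] (Li : List Int) :
    ∀ (L : List Int) (h y : Int),
      L.foldl (fun (s : Int × Int) o =>
          if (Li.foldl (fun (t : Bool × Int) i => if q i o then (false, o) else t) (true, s.2)).1 = false
          then (s.1 + 1, (Li.foldl (fun (t : Bool × Int) i => if q i o then (false, o) else t) (true, s.2)).2)
          else (s.1, (Li.foldl (fun (t : Bool × Int) i => if q i o then (false, o) else t) (true, s.2)).2)) (h, y)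
        = (h + ((L.countP fun o => Li.any fun i => decide (q i o)) : Int),
           ((L.filter fun o => Li.any fun i => decide (q i o)).getLast?).getD y) := by
  intro L
  induction L with
  | nil => intro h y; simp
  | cons a L ih =>
    intro h y
    rw [List.foldl_cons]
    simp only [pv_innerA (fun i => q i a) a Li]
    by_cases ha : (Li.any fun i => decide (q i a)) = true
    · simp only [ha]
      rw [ih]
      simp [ha, List.getLast?_cons]
      omega
    · simp only [Bool.not_eq_true] at ha
      simp [ha, ih]

-- B's inner scan: membership and nodup of the two accumulated sets.
theorem pv_innerB (matrix : List (List Int)) (c : Int) :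
    ∀ (L : List Int) (p : PySem.Set Int × PySem.Set Int) (x : Int),
      (x ∈ (L.foldl (fun (t : PySem.Set Int × PySem.Set Int) r =>
              if 0 < pvGet matrix c r then (PySem.Set.add t.1 r, PySem.Set.add t.2 c) else t) p).1
        ↔ x ∈ p.1 ∨ (x ∈ L ∧ 0 < pvGet matrix c x)) ∧
      (x ∈ (L.foldl (fun (t : PySem.Set Int × PySem.Set Int) r =>
              if 0 < pvGet matrix c r then (PySem.Set.add t.1 r, PySem.Set.add t.2 c) else t) p).2
        ↔ x ∈ p.2 ∨ (x = c ∧ ∃ r ∈ L, 0 < pvGet matrix c r)) ∧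
      (p.1.Nodup → (L.foldl (fun (t : PySem.Set Int × PySem.Set Int) r =>
              if 0 < pvGet matrix c r then (PySem.Set.add t.1 r, PySem.Set.add t.2 c) else t) p).1.Nodup) ∧
      (p.2.Nodup → (L.foldl (fun (t : PySem.Set Int × PySem.Set Int) r =>
              if 0 < pvGet matrix c r then (PySem.Set.add t.1 r, PySem.Set.add t.2 c) else t) p).2.Nodup) := by
  intro L
  induction L with
  | nil => intro p x; simp
  | cons a L ih =>
    intro p x
    simp only [List.foldl_cons]
    by_cases h : 0 < pvGet matrix c a
    · simp only [if_pos h]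
      obtain ⟨m1, m2, n1, n2⟩ := ih (PySem.Set.add p.1 a, PySem.Set.add p.2 c) x
      refine ⟨?_, ?_, fun hn => n1 (PySem.Set.nodup_add _ _ hn), fun hn => n2 (PySem.Set.nodup_add _ _ hn)⟩
      · rw [m1]
        simp only [PySem.Set.mem_add]
        by_cases hxa : x = a
        · subst hxa; simp [h]
        · simp [hxa]
      · rw [m2]
        simp only [PySem.Set.mem_add]
        by_cases hxc : x = c
        · subst hxc
          exact iff_of_true (Or.inl (Or.inr rfl)) (Or.inr ⟨rfl, a, by simp, h⟩)
        · simp [hxc]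
    · simp only [if_neg h]
      obtain ⟨m1, m2, n1, n2⟩ := ih p x
      refine ⟨?_, ?_, n1, n2⟩
      · rw [m1]
        by_cases hxa : x = a
        · subst hxa; simp [h]
        · simp [hxa]
      · rw [m2]
        constructor
        · rintro (hx | ⟨rfl, r, hr, hp⟩)
          · exact Or.inl hx
          · exact Or.inr ⟨rfl, r, List.mem_cons_of_mem _ hr, hp⟩
        · rintro (hx | ⟨rfl, r, hr, hp⟩)
          · exact Or.inl hx
          · rcases List.mem_cons.mp hr with rfl | hr
            · exact absurd hp h
            · exact Or.inr ⟨rfl, r, hr, hp⟩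

-- B's outer scan: membership and nodup of the final sets.
theorem pv_outerB (matrix : List (List Int)) (Li : List Int) :
    ∀ (L : List Int) (p : PySem.Set Int × PySem.Set Int) (x : Int),
      (x ∈ (L.foldl (fun (s : PySem.Set Int × PySem.Set Int) col =>
              Li.foldl (fun (t : PySem.Set Int × PySem.Set Int) row =>
                if 0 < pvGet matrix col row then (PySem.Set.add t.1 row, PySem.Set.add t.2 col) else t) s) p).1
        ↔ x ∈ p.1 ∨ (x ∈ Li ∧ ∃ c ∈ L, 0 < pvGet matrix c x)) ∧
      (x ∈ (L.foldl (fun (s : PySem.Set Int × PySem.Set Int) col =>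
              Li.foldl (fun (t : PySem.Set Int × PySem.Set Int) row =>
                if 0 < pvGet matrix col row then (PySem.Set.add t.1 row, PySem.Set.add t.2 col) else t) s) p).2
        ↔ x ∈ p.2 ∨ (x ∈ L ∧ ∃ r ∈ Li, 0 < pvGet matrix x r)) ∧
      (p.1.Nodup → (L.foldl (fun (s : PySem.Set Int × PySem.Set Int) col =>
              Li.foldl (fun (t : PySem.Set Int × PySem.Set Int) row =>
                if 0 < pvGet matrix col row then (PySem.Set.add t.1 row, PySem.Set.add t.2 col) else t) s) p).1.Nodup) ∧
      (p.2.Nodup → (L.foldl (fun (s : PySem.Set Int × PySem.Set Int) col =>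
              Li.foldl (fun (t : PySem.Set Int × PySem.Set Int) row =>
                if 0 < pvGet matrix col row then (PySem.Set.add t.1 row, PySem.Set.add t.2 col) else t) s) p).2.Nodup) := by
  intro L
  induction L with
  | nil => intro p x; simp
  | cons c L ih =>
    intro p x
    simp only [List.foldl_cons]
    obtain ⟨m1, m2, n1, n2⟩ := pv_innerB matrix c Li p x
    obtain ⟨M1, M2, N1, N2⟩ := ih (Li.foldl (fun (t : PySem.Set Int × PySem.Set Int) row =>
        if 0 < pvGet matrix c row then (PySem.Set.add t.1 row, PySem.Set.add t.2 c) else t) p) x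
    refine ⟨?_, ?_, fun hn => N1 (n1 hn), fun hn => N2 (n2 hn)⟩
    · rw [M1, m1]
      constructor
      · rintro ((h | ⟨hl, hp⟩) | ⟨hl, he⟩)
        · exact Or.inl h
        · exact Or.inr ⟨hl, c, List.mem_cons_self .., hp⟩
        · obtain ⟨a, ha, hp⟩ := he
          exact Or.inr ⟨hl, a, List.mem_cons_of_mem _ ha, hp⟩
      · rintro (h | ⟨hl, a, ha, hp⟩)
        · exact Or.inl (Or.inl h)
        · rcases List.mem_cons.mp ha with rfl | ha
          · exact Or.inl (Or.inr ⟨hl, hp⟩)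
          · exact Or.inr ⟨hl, a, ha, hp⟩
    · rw [M2, m2]
      constructor
      · rintro ((h | ⟨rfl, he⟩) | ⟨hl, he⟩)
        · exact Or.inl h
        · exact Or.inr ⟨List.mem_cons_self .., he⟩
        · exact Or.inr ⟨List.mem_cons_of_mem _ hl, he⟩
      · rintro (h | ⟨hm, he⟩)
        · exact Or.inl (Or.inl h)
        · rcases List.mem_cons.mp hm with rfl | hl
          · exact Or.inl (Or.inr ⟨rfl, he⟩)
          · exact Or.inr ⟨hl, he⟩

-- min of a list that is a permutation of a strictly increasing list is that list's head.
theorem pv_min_perm (l1 l2 : List Int) (hp : l1.Perm l2) (hs : l2.Pairwise (· < ·)) :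
    (PySem.List.min? l1 (fun x => x)).getD 0 = l2.head?.getD 0 := by
  cases l2 with
  | nil =>
    have h1 : l1 = [] := by
      have := hp.length_eq
      simpa using List.length_eq_zero_iff.mp (by simpa using this)
    subst h1
    rw [(PySem.List.min?_eq_none_iff [] fun x => x).mpr rfl]
    rfl
  | cons h t =>
    cases e : PySem.List.min? l1 (fun x => x) with
    | none =>
      have : l1 = [] := (PySem.List.min?_eq_none_iff l1 fun x => x).mp e
      subst this
      simpa using hp.length_eq
    | some m =>
      have hmem : m ∈ h :: t := hp.mem_iff.mp (PySem.List.min?_mem e)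
      have hh1 : h ∈ l1 := hp.mem_iff.mpr (List.mem_cons_self ..)
      have h1 : m ≤ h := PySem.List.min?_isMin e h hh1
      have h2 : h ≤ m := by
        rcases List.mem_cons.mp hmem with rfl | hmt
        · exact le_refl m
        · exact le_of_lt (List.rel_of_pairwise_cons hs hmt)
      have : m = h := le_antisymm h1 h2
      subst this
      rfl

-- canonical form both ports are reduced to
def pvR (matrix : List (List Int)) : List Int := PySem.List.pyRange 0 (matrix.length : Int) 1
def pvPr (matrix : List (List Int)) (o : Int) : Bool := (pvR matrix).any fun i => decide (0 < pvGet matrix i o)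
def pvPc (matrix : List (List Int)) (o : Int) : Bool := (pvR matrix).any fun i => decide (0 < pvGet matrix o i)
def pvCanon (matrix : List (List Int)) : List (String × Int) :=
  [("width", ((pvR matrix).countP (pvPc matrix) : Int)),
   ("height", ((pvR matrix).countP (pvPr matrix) : Int)),
   ("x_first", (((pvR matrix).filter (pvPc matrix)).head?).getD 0),
   ("y_first", (((pvR matrix).filter (pvPr matrix)).head?).getD 0)]

theorem pv_A_canon (matrix : List (List Int)) : get_crop_parameters_py matrix = pvCanon matrix := by
  have hR : PySem.List.pyRange ((matrix.length : Int) - 1) (-1) (-1)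
      = (PySem.List.pyRange 0 (matrix.length : Int) 1).reverse := by
    rw [PySem.List.pyRange_neg_one_eq_reverse]
    norm_num
  simp only [get_crop_parameters_py]
  rw [hR]
  rw [pv_foldA (fun i o : Int => 0 < pvGet matrix i o)
      ((PySem.List.pyRange 0 (matrix.length : Int) 1).reverse)
      ((PySem.List.pyRange 0 (matrix.length : Int) 1).reverse) 0 0]
  rw [pv_foldA (fun i o : Int => 0 < pvGet matrix o i)
      ((PySem.List.pyRange 0 (matrix.length : Int) 1).reverse)
      ((PySem.List.pyRange 0 (matrix.length : Int) 1).reverse) 0 0]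
  simp only [pvCanon, pvR, List.any_reverse, List.countP_reverse,
    List.filter_reverse, List.getLast?_reverse, zero_add]
  rfl

theorem pv_B_canon (matrix : List (List Int)) : get_crop_parameters_py_alt matrix = pvCanon matrix := by
  simp only [get_crop_parameters_py_alt]
  set O := (PySem.List.pyRange 0 (matrix.length : Int) 1).foldl
      (fun (s : PySem.Set Int × PySem.Set Int) col =>
        (PySem.List.pyRange 0 (matrix.length : Int) 1).foldl
          (fun (t : PySem.Set Int × PySem.Set Int) row =>
            if 0 < pvGet matrix col row then (PySem.Set.add t.1 row, PySem.Set.add t.2 col) else t)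
          s)
      (PySem.Set.empty, PySem.Set.empty) with hO
  have hOut := pv_outerB matrix (PySem.List.pyRange 0 (matrix.length : Int) 1)
      (PySem.List.pyRange 0 (matrix.length : Int) 1) (PySem.Set.empty, PySem.Set.empty)
  rw [← hO] at hOut
  have hn1 : O.1.Nodup := (hOut 0).2.2.1 List.nodup_nil
  have hn2 : O.2.Nodup := (hOut 0).2.2.2 List.nodup_nil
  have hp1 : O.1.Perm ((pvR matrix).filter (pvPr matrix)) := by
    refine (List.perm_ext_iff_of_nodup hn1 (List.Nodup.filter _ ?_)).mpr ?_
    · exact PySem.List.nodup_pyRange_one 0 (matrix.length : Int)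
    · intro a
      rw [(hOut a).1, List.mem_filter]
      simp [pvPr, pvR, PySem.Set.empty, List.any_eq_true]
  have hp2 : O.2.Perm ((pvR matrix).filter (pvPc matrix)) := by
    refine (List.perm_ext_iff_of_nodup hn2 (List.Nodup.filter _ ?_)).mpr ?_
    · exact PySem.List.nodup_pyRange_one 0 (matrix.length : Int)
    · intro a
      rw [(hOut a).2.1, List.mem_filter]
      simp [pvPc, pvR, PySem.Set.empty, List.any_eq_true]
  have ew : PySem.Set.len O.2 = (((pvR matrix).countP (pvPc matrix) : Nat) : Int) := by
    show ((O.2.length : Nat) : Int) = _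
    rw [List.countP_eq_length_filter]
    exact_mod_cast hp2.length_eq
  have eh : PySem.Set.len O.1 = (((pvR matrix).countP (pvPr matrix) : Nat) : Int) := by
    show ((O.1.length : Nat) : Int) = _
    rw [List.countP_eq_length_filter]
    exact_mod_cast hp1.length_eq
  have ex : (PySem.List.min? O.2 (fun x => x)).getD 0 = (((pvR matrix).filter (pvPc matrix)).head?).getD 0 := by
    refine pv_min_perm _ _ hp2 (List.Pairwise.filter _ ?_)
    exact PySem.List.pairwise_lt_pyRange_one 0 (matrix.length : Int)
  have ey : (PySem.List.min? O.1 (fun x => x)).getD 0 = (((pvR matrix).filter (pvPr matrix)).head?).getD 0 := by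
    refine pv_min_perm _ _ hp1 (List.Pairwise.filter _ ?_)
    exact PySem.List.pairwise_lt_pyRange_one 0 (matrix.length : Int)
  rw [ew, eh, ex, ey]
  rfl

-- ===== VERDICT (by name: the statement is the Claim_ definition above) =====
theorem get_crop_parameters_py_spec : Claim_equal_get_crop_parameters_py := by
  intro matrix _ _
  unfold Spec_get_crop_parameters_py
  rw [pv_A_canon, pv_B_canon]
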